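-- pv_equiv track=rewrite | github.com/m1sterzer0/JuliaAtcoder | python/abc170_179/abc172_C.py | solve
-- ===== SOURCE A (Python) =====
-- def solve(N,M,K,A,B) :
--     best = 0
--     running = 0; pa = -1; pb = -1
--     while pa + 1 < N and running + A[pa+1] <= K : pa += 1; running += A[pa]
--     while pb + 1 < M and running + B[pb+1] <= K : pb += 1; running += B[pb]
--     best = max(best,(pa+1)+(pb+1))
--     while pa >= 0 :
--         running -= A[pa]; pa -= 1
--         while pb + 1 < M and running + B[pb+1] <= K : pb += 1; running += B[pb]
--         best = max(best,(pa+1)+(pb+1))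
--     return best
-- ===== SOURCE B (Python) =====
-- def solve(N, M, K, A, B):
--     # Prefix-sum arrays + a range-max segment tree answering "first prefix of B
--     # exceeding a budget" by descent, replacing A's inner greedy scan.
--     prefA = [0]
--     s = 0
--     for i in range(N):
--         s += A[i]
--         prefA.append(s)
--     prefB = [0]
--     s = 0
--     for i in range(M):
--         s += B[i]
--         prefB.append(s)
--
--     def build(lo, hi):
--         if hi - lo == 1:
--             return (prefB[lo], None, None)
--         mid = (lo + hi) // 2
--         L = build(lo, mid)
--         R = build(mid, hi)
--         return (max(L[0], R[0]), L, R)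
--
--     def query(node, lo, hi, l, t):
--         # first index idx in [max(lo,l), hi) with prefB[idx] > t, else None
--         if hi <= l or node[0] <= t:
--             return None
--         if hi - lo == 1:
--             return lo
--         mid = (lo + hi) // 2
--         r = query(node[1], lo, mid, l, t)
--         if r is not None:
--             return r
--         return query(node[2], mid, hi, l, t)
--
--     tree = build(1, M + 1) if M > 0 else None
--     i0 = 0
--     while i0 < N and prefA[i0 + 1] <= K:
--         i0 += 1
--     best = 0
--     j = 0
--     i = i0
--     while i >= 0:
--         t = K - prefA[i]
--         if tree is not None:
--             nxt = query(tree, 1, M + 1, j + 1, t)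
--             j = M if nxt is None else nxt - 1
--         if i + j > best:
--             best = i + j
--         i -= 1
--     return best
-- ===== Notes on version B (the rewrite author's own statement) =====
-- stated objective: alternative
-- what changed: A is a sticky two-pointer scan (greedy A-prefix, then drop one A-book at a time while an inner loop re-extends the B-pointer); B first builds prefix-sum arrays of both stacks and a range-max segment tree over B's prefixes, then for each retained A-prefix answers 'first B-prefix exceeding the remaining budget' by a tree descent instead of an inner scan.
-- outside the precondition, e.g. on solve(2, 0, 0, [5], []): A returns 0, B raises IndexError
import Mathlib
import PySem

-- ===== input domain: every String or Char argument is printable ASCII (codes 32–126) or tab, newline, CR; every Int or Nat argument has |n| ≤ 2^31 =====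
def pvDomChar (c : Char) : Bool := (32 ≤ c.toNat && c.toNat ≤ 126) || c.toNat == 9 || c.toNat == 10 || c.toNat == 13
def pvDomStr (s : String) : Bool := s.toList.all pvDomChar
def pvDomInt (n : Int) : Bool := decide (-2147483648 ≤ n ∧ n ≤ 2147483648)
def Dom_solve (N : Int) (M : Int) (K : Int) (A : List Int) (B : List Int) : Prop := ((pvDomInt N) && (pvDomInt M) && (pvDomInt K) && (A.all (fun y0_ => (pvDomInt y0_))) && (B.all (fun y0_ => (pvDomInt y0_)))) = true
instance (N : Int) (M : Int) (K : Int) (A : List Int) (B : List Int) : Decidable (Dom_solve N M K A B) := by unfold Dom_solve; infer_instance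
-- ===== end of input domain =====

-- B replaces A's sticky two-pointer scan by prefix-sum arrays plus a range-max segment
-- tree answering "first B-prefix exceeding the remaining budget" by descent; objective:
-- alternative (same asymptotic cost, different algorithmic structure).

-- ===== PORT A =====
-- while pa + 1 < N and running + A[pa+1] <= K : pa += 1; running += A[pa]
-- fuel = (N - (pa+1)).toNat: zero exactly when the bound check pa+1 < N already fails
def solveLoop1 (N K : Int) (A : List Int) : Nat → Int → Int → Int × Int
  | 0, pa, running => (pa, running)
  | fuel + 1, pa, running =>
    if pa + 1 < N ∧ running + PySem.List.pyGetD A (pa + 1) 0 ≤ K then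
      solveLoop1 N K A fuel (pa + 1) (running + PySem.List.pyGetD A (pa + 1) 0)
    else (pa, running)

-- while pb + 1 < M and running + B[pb+1] <= K : pb += 1; running += B[pb]
def solveLoop2 (M K : Int) (B : List Int) : Nat → Int → Int → Int × Int
  | 0, pb, running => (pb, running)
  | fuel + 1, pb, running =>
    if pb + 1 < M ∧ running + PySem.List.pyGetD B (pb + 1) 0 ≤ K then
      solveLoop2 M K B fuel (pb + 1) (running + PySem.List.pyGetD B (pb + 1) 0)
    else (pb, running)

-- while pa >= 0 : running -= A[pa]; pa -= 1; <loop2>; best = max(best,(pa+1)+(pb+1))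
-- fuel = (pa+1).toNat: zero exactly when pa >= 0 fails
def solveLoop3 (M K : Int) (A B : List Int) : Nat → Int → Int → Int → Int → Int
  | 0, _pa, _pb, _running, best => best
  | fuel + 1, pa, pb, running, best =>
    let running' := running - PySem.List.pyGetD A pa 0
    let pa' := pa - 1
    let s := solveLoop2 M K B (M - (pb + 1)).toNat pb running'
    solveLoop3 M K A B fuel pa' s.1 s.2 (max best ((pa' + 1) + (s.1 + 1)))

def solve (N : Int) (M : Int) (K : Int) (A : List Int) (B : List Int) : Int :=
  let s1 := solveLoop1 N K A N.toNat (-1) 0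
  let s2 := solveLoop2 M K B M.toNat (-1) s1.2
  let best := max 0 ((s1.1 + 1) + (s2.1 + 1))
  solveLoop3 M K A B (s1.1 + 1).toNat s1.1 s2.1 s2.2 best

-- ===== PORT B =====
-- pref = [0]; s = 0; for i in range(n): s += X[i]; pref.append(s)
def prefGo (X : List Int) : Nat → Int → Int → List Int → List Int
  | 0, _, _, acc => acc
  | fuel + 1, i, s, acc =>
    let s' := s + PySem.List.pyGetD X i 0
    prefGo X fuel (i + 1) s' (acc ++ [s'])

def mkPref (X : List Int) (n : Int) : List Int := prefGo X n.toNat 0 0 [0]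

-- Python builds the tree as nested tuples (mx, L, R) / (v, None, None); ported as an inductive.
inductive FTree where
  | leaf : Int → FTree
  | node : Int → FTree → FTree → FTree
deriving DecidableEq, Repr

def fmx : FTree → Int
  | FTree.leaf v => v
  | FTree.node m _ _ => m

-- def build(lo, hi): leaf if hi-lo==1 else node over halves; fuel = span bound
def buildT (pref : List Int) : Nat → Int → Int → FTree
  | 0, lo, _ => FTree.leaf (PySem.List.pyGetD pref lo 0)
  | fuel + 1, lo, hi =>
    if hi - lo = 1 then FTree.leaf (PySem.List.pyGetD pref lo 0)
    else
      let mid := PySem.Int.floordiv (lo + hi) 2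
      let L := buildT pref fuel lo mid
      let R := buildT pref fuel mid hi
      FTree.node (max (fmx L) (fmx R)) L R

-- def query(node, lo, hi, l, t): first idx in [max(lo,l), hi) with pref[idx] > t, else None
def queryT (t : Int) : FTree → Int → Int → Int → Option Int
  | FTree.leaf v, lo, hi, l => if hi ≤ l ∨ v ≤ t then none else some lo
  | FTree.node m L R, lo, hi, l =>
    if hi ≤ l ∨ m ≤ t then none
    else
      let mid := PySem.Int.floordiv (lo + hi) 2
      match queryT t L lo mid l with
      | some r => some r
      | none => queryT t R mid hi l

-- i0 = 0; while i0 < N and prefA[i0+1] <= K: i0 += 1   (fuel = (N - i0).toNat)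
def i0Loop (N K : Int) (prefA : List Int) : Nat → Int → Int
  | 0, i => i
  | fuel + 1, i =>
    if i < N ∧ PySem.List.pyGetD prefA (i + 1) 0 ≤ K then i0Loop N K prefA fuel (i + 1)
    else i

-- i = i0; while i >= 0: t = K - prefA[i]; query; update j, best; i -= 1  (fuel = (i+1).toNat)
def outLoop (M K : Int) (prefA : List Int) (tree : Option FTree) : Nat → Int → Int → Int → Int
  | 0, _, _, best => best
  | fuel + 1, i, j, best =>
    let t := K - PySem.List.pyGetD prefA i 0
    let j' := match tree with
      | none => j
      | some tr =>
        match queryT t tr 1 (M + 1) (j + 1) with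
        | none => M
        | some idx => idx - 1
    let best' := if best < i + j' then i + j' else best
    outLoop M K prefA tree fuel (i - 1) j' best'

def solve_alt (N : Int) (M : Int) (K : Int) (A : List Int) (B : List Int) : Int :=
  let prefA := mkPref A N
  let prefB := mkPref B M
  let tree : Option FTree := if 0 < M then some (buildT prefB M.toNat 1 (M + 1)) else none
  let i0 := i0Loop N K prefA N.toNat 0
  outLoop M K prefA tree (i0 + 1).toNat i0 0 0

-- ===== PRECONDITION & SPEC =====
-- Pre_ excludes inputs where N > len(A) or M > len(B), on which Python A can raise
-- IndexError; it is slightly narrower than the exact raise set (A returns when the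
-- budget K stops the scan before the missing index is touched, while B's prefix
-- pass always reads all of A[:N] and B[:M] and raises there).
def Pre_solve (N : Int) (M : Int) (K : Int) (A : List Int) (B : List Int) : Prop :=
  N ≤ A.length ∧ M ≤ B.length
instance (N : Int) (M : Int) (K : Int) (A : List Int) (B : List Int) : Decidable (Pre_solve N M K A B) := by unfold Pre_solve; infer_instance

def pvWitness_solve : Int × Int × Int × List Int × List Int := (3, 2, 10, [3, 4, 5], [2, 6])

def Spec_solve (N : Int) (M : Int) (K : Int) (A : List Int) (B : List Int) (out : Int) : Prop := out = solve_alt N M K A B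
instance (N : Int) (M : Int) (K : Int) (A : List Int) (B : List Int) (out : Int) : Decidable (Spec_solve N M K A B out) := by unfold Spec_solve; infer_instance

-- ===== CLAIM (what is proved, stated in full; the proofs are below) =====
def Claim_equal_solve : Prop := ∀ (N : Int) (M : Int) (K : Int) (A : List Int) (B : List Int), Dom_solve N M K A B → Pre_solve N M K A B → Spec_solve N M K A B (solve N M K A B)

-- ===== LEMMAS AND PROOFS =====

-- sum of the first j elements (Python prefix sum prefX[j])
def sPref (X : List Int) (j : Int) : Int := (X.take j.toNat).sum

-- reference linear chain: j := j+1 while j < M and sPref B (j+1) <= t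
def linScan (M t : Int) (B : List Int) : Nat → Int → Int
  | 0, j => j
  | fuel + 1, j =>
    if j < M ∧ sPref B (j + 1) ≤ t then linScan M t B fuel (j + 1) else j

-- reference linear first-exceed: first idx in [l, l+fuel) with t < pref[idx]
def firstEx (pref : List Int) (t : Int) : Nat → Int → Option Int
  | 0, _ => none
  | fuel + 1, l =>
    if t < PySem.List.pyGetD pref l 0 then some l else firstEx pref t fuel (l + 1)

theorem sPref_succ (X : List Int) (j : Int) (hj : 0 ≤ j) :
    sPref X (j + 1) = sPref X j + PySem.List.pyGetD X j 0 := by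
  unfold sPref
  have h1 : (j + 1).toNat = j.toNat + 1 := by omega
  rw [h1]
  by_cases h : j.toNat < X.length
  · rw [PySem.List.pyGetD_eq_getElem X 0 hj (by omega)]
    exact List.sum_take_succ X j.toNat h
  · have h2 : PySem.List.pyGetD X j 0 = 0 := by
      have hlt : ¬ j < (X.length : Int) := by omega
      simp [PySem.List.pyGetD, PySem.List.pyGet?, PySem.List.pyIdx?, hj, hlt]
    rw [h2, List.take_of_length_le (by omega), List.take_of_length_le (by omega)]
    ring

theorem prefGo_eq (X : List Int) :
    ∀ (f i : Nat) (acc : List Int),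
      prefGo X f (i : Int) (sPref X (i : Int)) acc =
        acc ++ (List.range f).map (fun (k : Nat) => sPref X (((i + k + 1 : Nat)) : Int)) := by
  intro f
  induction f with
  | zero => intro i acc; simp [prefGo]
  | succ f ih =>
    intro i acc
    simp only [prefGo]
    rw [← sPref_succ X (i : Int) (by positivity)]
    have hcast : ((i : Int) + 1) = ((i + 1 : Nat) : Int) := by push_cast; ring
    rw [hcast, ih (i + 1) (acc ++ [sPref X ((i + 1 : Nat) : Int)])]
    rw [List.range_succ_eq_map]
    simp only [List.map_cons, List.map_map, List.append_assoc, List.cons_append, List.nil_append]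
    have hm : List.map ((fun (k : Nat) => sPref X ((i + k + 1 : Nat) : Int)) ∘ Nat.succ) (List.range f)
        = List.map (fun (k : Nat) => sPref X ((i + 1 + k + 1 : Nat) : Int)) (List.range f) := by
      apply List.map_congr_left
      intro k _
      simp only [Function.comp_apply]
      rw [show i + Nat.succ k + 1 = i + 1 + k + 1 from by omega]
    rw [show i + 0 + 1 = i + 1 from by omega, hm]

theorem mkPref_eq (X : List Int) (n : Int) :
    mkPref X n = 0 :: (List.range n.toNat).map (fun (k : Nat) => sPref X ((k + 1 : Nat) : Int)) := by
  unfold mkPref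
  have h0 := prefGo_eq X n.toNat 0 [0]
  simp only [Nat.cast_zero, Nat.zero_add] at h0
  rw [show sPref X (0 : Int) = 0 from by simp [sPref]] at h0
  simpa using h0

theorem mkPref_get (X : List Int) (n j : Int) (hj : 0 ≤ j) (hjn : j.toNat ≤ n.toNat) :
    PySem.List.pyGetD (mkPref X n) j 0 = sPref X j := by
  rw [mkPref_eq, show j = ((j.toNat : Nat) : Int) from by omega, PySem.List.pyGetD_natCast]
  rcases Nat.eq_zero_or_pos j.toNat with h0 | hpos
  · rw [h0]; simp [sPref]
  · obtain ⟨k, hk⟩ : ∃ k, j.toNat = k + 1 := ⟨j.toNat - 1, by omega⟩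
    rw [hk, List.getD_cons_succ, List.getD_eq_getElem?_getD]
    simp only [List.getElem?_map, List.getElem?_range (show k < n.toNat from by omega)]
    simp

theorem firstEx_none_iff (pref : List Int) (t : Int) :
    ∀ (f : Nat) (l : Int), firstEx pref t f l = none ↔
      ∀ idx, l ≤ idx → idx < l + (f : Int) → PySem.List.pyGetD pref idx 0 ≤ t := by
  intro f
  induction f with
  | zero => intro l; simp [firstEx]; intro idx h1 h2; omega
  | succ f ih =>
    intro l
    simp only [firstEx]
    by_cases h : t < PySem.List.pyGetD pref l 0
    · simp only [if_pos h]
      constructor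
      · intro hc; exact absurd hc (by simp)
      · intro hall
        exact absurd (hall l le_rfl (by push_cast; omega)) (by omega)
    · simp only [if_neg h]
      rw [ih (l + 1)]
      constructor
      · intro hall idx h1 h2
        rcases eq_or_lt_of_le h1 with rfl | hlt
        · omega
        · exact hall idx (by omega) (by push_cast at h2 ⊢; omega)
      · intro hall idx h1 h2
        exact hall idx (by omega) (by push_cast at h2 ⊢; omega)

theorem firstEx_split (pref : List Int) (t : Int) :
    ∀ (g f : Nat) (l : Int),
      firstEx pref t (g + f) l =
        (match firstEx pref t g l with
         | some r => some r
         | none => firstEx pref t f (l + (g : Int))) := by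
  intro g
  induction g with
  | zero => intro f l; simp [firstEx]
  | succ g ih =>
    intro f l
    rw [show g + 1 + f = (g + f) + 1 from by omega]
    simp only [firstEx]
    by_cases h : t < PySem.List.pyGetD pref l 0
    · simp [if_pos h]
    · simp only [if_neg h]
      rw [ih f (l + 1)]
      have : l + 1 + (g : Int) = l + ((g + 1 : Nat) : Int) := by push_cast; ring
      rw [this]

theorem mid_bounds (lo hi : Int) (h : 2 ≤ hi - lo) :
    lo + 1 ≤ PySem.Int.floordiv (lo + hi) 2 ∧ PySem.Int.floordiv (lo + hi) 2 ≤ hi - 1 := by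
  constructor
  · rw [PySem.Int.le_floordiv_iff_mul_le (by norm_num)]; omega
  · have : PySem.Int.floordiv (lo + hi) 2 < hi := by
      rw [PySem.Int.floordiv_lt_iff_lt_mul (by norm_num)]; omega
    omega

theorem buildT_ub (pref : List Int) :
    ∀ (f : Nat) (lo hi : Int), 1 ≤ hi - lo → hi - lo ≤ (f : Int) →
      ∀ idx, lo ≤ idx → idx < hi → PySem.List.pyGetD pref idx 0 ≤ fmx (buildT pref f lo hi) := by
  intro f
  induction f with
  | zero => intro lo hi h1 h2; exfalso; push_cast at h2; omega
  | succ f ih =>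
    intro lo hi h1 h2 idx hidx1 hidx2
    simp only [buildT]
    by_cases hone : hi - lo = 1
    · rw [if_pos hone]
      simp only [fmx]
      rw [show idx = lo from by omega]
    · rw [if_neg hone]
      simp only [fmx]
      have hb := mid_bounds lo hi (by omega)
      by_cases hside : idx < PySem.Int.floordiv (lo + hi) 2
      · exact le_trans (ih lo _ (by omega) (by push_cast at h2 ⊢; omega) idx hidx1 hside) (le_max_left _ _)
      · exact le_trans (ih _ hi (by omega) (by push_cast at h2 ⊢; omega) idx (by omega) hidx2) (le_max_right _ _)

theorem queryT_eq (pref : List Int) (t : Int) :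
    ∀ (f : Nat) (lo hi : Int), 1 ≤ hi - lo → hi - lo ≤ (f : Int) →
      ∀ l, queryT t (buildT pref f lo hi) lo hi l =
        firstEx pref t (hi - max lo l).toNat (max lo l) := by
  intro f
  induction f with
  | zero => intro lo hi h1 h2; exfalso; push_cast at h2; omega
  | succ f ih =>
    intro lo hi h1 h2 l
    simp only [buildT]
    by_cases hone : hi - lo = 1
    · rw [if_pos hone]
      simp only [queryT]
      by_cases hl : hi ≤ l
      · rw [if_pos (Or.inl hl), show (hi - max lo l).toNat = 0 from by omega]
        rfl
      · have hm : max lo l = lo := by omega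
        rw [hm, show (hi - lo).toNat = 1 from by omega]
        simp only [firstEx]
        by_cases hv : PySem.List.pyGetD pref lo 0 ≤ t
        · rw [if_pos (Or.inr hv), if_neg (by omega)]
        · rw [if_neg (by push_neg; refine ⟨by omega, by omega⟩), if_pos (by omega)]
    · rw [if_neg hone]
      have hb := mid_bounds lo hi (by omega)
      set mid := PySem.Int.floordiv (lo + hi) 2 with hmid
      simp only [queryT]
      by_cases hl : hi ≤ l
      · rw [if_pos (Or.inl hl), show (hi - max lo l).toNat = 0 from by omega]
        rfl
      · by_cases hmx : max (fmx (buildT pref f lo mid)) (fmx (buildT pref f mid hi)) ≤ t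
        · rw [if_pos (Or.inr hmx)]
          symm
          rw [firstEx_none_iff]
          intro idx hi1 hi2
          by_cases hside : idx < mid
          · exact le_trans (le_trans (buildT_ub pref f lo mid (by omega) (by push_cast at h2 ⊢; omega) idx (by omega) hside) (le_max_left _ _)) hmx
          · exact le_trans (le_trans (buildT_ub pref f mid hi (by omega) (by push_cast at h2 ⊢; omega) idx (by omega) (by omega)) (le_max_right _ _)) hmx
        · rw [if_neg (by push_neg; refine ⟨by omega, by omega⟩)]
          rw [ih lo mid (by omega) (by push_cast at h2 ⊢; omega) l,
              ih mid hi (by omega) (by push_cast at h2 ⊢; omega) l]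
          by_cases hlm : l ≤ mid
          · have hmm : max mid l = mid := by omega
            have hsum : (hi - max lo l).toNat = (mid - max lo l).toNat + (hi - mid).toNat := by omega
            rw [hmm, hsum, firstEx_split]
            have harg : max lo l + ((mid - max lo l).toNat : Int) = mid := by omega
            rw [harg]
          · have hm1 : max lo l = l := by omega
            have hm2 : max mid l = l := by omega
            rw [hm1, hm2, show (mid - l).toNat = 0 from by omega]
            simp [firstEx]

theorem linScan_bounds (M t : Int) (B : List Int) :
    ∀ (f : Nat) (j : Int), (f : Int) = M - j →
      j ≤ linScan M t B f j ∧ linScan M t B f j ≤ M := by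
  intro f
  induction f with
  | zero => intro j h; simp only [linScan]; omega
  | succ f ih =>
    intro j h
    simp only [linScan]
    split
    · have := ih (j + 1) (by push_cast at h ⊢; omega)
      omega
    · push_cast at h; omega

theorem linScan_firstEx (M t : Int) (B : List Int) :
    ∀ (f : Nat) (j : Int), 0 ≤ j → (f : Int) = M - j →
      linScan M t B f j =
        (match firstEx (mkPref B M) t f (j + 1) with
         | none => M
         | some x => x - 1) := by
  intro f
  induction f with
  | zero => intro j hj h; simp only [linScan, firstEx]; omega
  | succ f ih =>
    intro j hj h
    have hjM : j < M := by push_cast at h; omega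
    have hget : PySem.List.pyGetD (mkPref B M) (j + 1) 0 = sPref B (j + 1) :=
      mkPref_get B M (j + 1) (by omega) (by omega)
    simp only [linScan, firstEx, hget]
    by_cases hc : sPref B (j + 1) ≤ t
    · rw [if_pos ⟨hjM, hc⟩, if_neg (by omega)]
      exact ih (j + 1) (by omega) (by push_cast at h ⊢; omega)
    · rw [if_neg (by intro hx; exact hc hx.2), if_pos (by omega)]
      show j = j + 1 - 1
      omega

theorem treeStep_eq (M t : Int) (B : List Int) (j : Int) (hj : 0 ≤ j) (hjM : j ≤ M) (hM : 0 < M) :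
    (match queryT t (buildT (mkPref B M) M.toNat 1 (M + 1)) 1 (M + 1) (j + 1) with
     | none => M
     | some idx => idx - 1) = linScan M t B (M - j).toNat j := by
  rw [queryT_eq (mkPref B M) t M.toNat 1 (M + 1) (by omega) (by omega) (j + 1)]
  rw [show max 1 (j + 1) = j + 1 from by omega]
  rw [show (M + 1 - (j + 1)).toNat = (M - j).toNat from by omega]
  rw [linScan_firstEx M t B (M - j).toNat j hj (by omega)]

theorem loop2_lin (M K : Int) (B : List Int) :
    ∀ (f : Nat) (pb c : Int), 0 ≤ pb + 1 →
      solveLoop2 M K B f pb (c + sPref B (pb + 1)) =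
        (linScan M (K - c) B f (pb + 1) - 1, c + sPref B (linScan M (K - c) B f (pb + 1))) := by
  intro f
  induction f with
  | zero =>
    intro pb c h
    simp only [solveLoop2, linScan]
    rw [show pb + 1 - 1 = pb from by omega]
  | succ f ih =>
    intro pb c h
    have hs : sPref B (pb + 1 + 1) = sPref B (pb + 1) + PySem.List.pyGetD B (pb + 1) 0 :=
      sPref_succ B (pb + 1) h
    simp only [solveLoop2, linScan]
    by_cases h1 : pb + 1 < M
    · by_cases h2 : sPref B (pb + 1 + 1) ≤ K - c
      · rw [if_pos ⟨h1, by omega⟩, if_pos ⟨h1, h2⟩]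
        have := ih (pb + 1) c (by omega)
        rw [show c + sPref B (pb + 1) + PySem.List.pyGetD B (pb + 1) 0 = c + sPref B (pb + 1 + 1) from by omega]
        exact this
      · rw [if_neg (by intro hx; exact h2 (by omega)), if_neg (by intro hx; exact h2 hx.2)]
        rw [show pb + 1 - 1 = pb from by omega]
    · rw [if_neg (by intro hx; exact h1 hx.1), if_neg (by intro hx; exact h1 hx.1)]
      rw [show pb + 1 - 1 = pb from by omega]

theorem loop1_eq (N K : Int) (A : List Int) :
    ∀ (f : Nat) (i : Int), 0 ≤ i →
      solveLoop1 N K A f (i - 1) (sPref A i) =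
        (i0Loop N K (mkPref A N) f i - 1, sPref A (i0Loop N K (mkPref A N) f i)) := by
  intro f
  induction f with
  | zero => intro i hi; simp only [solveLoop1, i0Loop]
  | succ f ih =>
    intro i hi
    simp only [solveLoop1, i0Loop]
    rw [show i - 1 + 1 = i from by omega]
    by_cases hN : i < N
    · have hget : PySem.List.pyGetD (mkPref A N) (i + 1) 0 = sPref A (i + 1) :=
        mkPref_get A N (i + 1) (by omega) (by omega)
      have hs : sPref A (i + 1) = sPref A i + PySem.List.pyGetD A i 0 := sPref_succ A i hi
      rw [hget]
      by_cases hK : sPref A (i + 1) ≤ K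
      · rw [if_pos ⟨hN, by omega⟩, if_pos ⟨hN, hK⟩]
        have := ih (i + 1) (by omega)
        rw [show i + 1 - 1 = i from by omega] at this
        rw [show sPref A i + PySem.List.pyGetD A i 0 = sPref A (i + 1) from by omega]
        exact this
      · rw [if_neg (by intro hx; exact hK (by omega)), if_neg (by intro hx; exact hK hx.2)]
    · rw [if_neg (by intro hx; exact hN hx.1), if_neg (by intro hx; exact hN hx.1)]

theorem i0Loop_bounds (N K : Int) (prefA : List Int) :
    ∀ (f : Nat) (i : Int), i ≤ i0Loop N K prefA f i ∧ i0Loop N K prefA f i ≤ max i N := by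
  intro f
  induction f with
  | zero => intro i; simp [i0Loop]
  | succ f ih =>
    intro i
    simp only [i0Loop]
    split
    · rename_i hc
      have := ih (i + 1)
      constructor
      · omega
      · have h2 := this.2
        omega
    · simp

theorem outer_eq (N M K : Int) (A B : List Int) :
    ∀ (n : Nat) (p j best : Int), n = (p + 1).toNat → 0 ≤ j → (j ≤ M ∨ M ≤ 0) →
      (p.toNat < N.toNat ∨ p < 0) → -1 ≤ p →
      solveLoop3 M K A B n p (j - 1) (sPref A (p + 1) + sPref B j) best =
        outLoop M K (mkPref A N)
          (if 0 < M then some (buildT (mkPref B M) M.toNat 1 (M + 1)) else none)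
          n p j best := by
  intro n
  induction n with
  | zero => intro p j best hn hj hjM hpN hp; simp only [solveLoop3, outLoop]
  | succ n ih =>
    intro p j best hn hj hjM hpN hp
    have hp0 : 0 ≤ p := by omega
    simp only [solveLoop3, outLoop]
    -- the A-side running after the pop
    rw [show sPref A (p + 1) + sPref B j - PySem.List.pyGetD A p 0
          = sPref A p + sPref B j from by
        have := sPref_succ A p hp0; omega]
    rw [show (M - (j - 1 + 1)).toNat = (M - j).toNat from by omega]
    rw [show sPref A p + sPref B j = sPref A p + sPref B (j - 1 + 1) from by
      rw [show j - 1 + 1 = j from by omega]]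
    rw [loop2_lin M K B (M - j).toNat (j - 1) (sPref A p) (by omega)]
    rw [show j - 1 + 1 = j from by omega]
    set j' := linScan M (K - sPref A p) B (M - j).toNat j with hj'def
    have hj'0 : 0 ≤ j' ∧ (j' ≤ M ∨ M ≤ 0) := by
      by_cases hM : 0 < M
      · have hb := linScan_bounds M (K - sPref A p) B (M - j).toNat j (by omega)
        exact ⟨by omega, Or.inl hb.2⟩
      · have : (M - j).toNat = 0 := by omega
        rw [hj'def, this]
        simp only [linScan]
        exact ⟨hj, Or.inr (by omega)⟩
    -- the B-side lookup and query
    have hgetA : PySem.List.pyGetD (mkPref A N) p 0 = sPref A p :=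
      mkPref_get A N p hp0 (by omega)
    rw [hgetA]
    have hquery :
        (match (if 0 < M then some (buildT (mkPref B M) M.toNat 1 (M + 1)) else none) with
          | none => j
          | some tr =>
            match queryT (K - sPref A p) tr 1 (M + 1) (j + 1) with
            | none => M
            | some idx => idx - 1) = j' := by
      by_cases hM : 0 < M
      · rw [if_pos hM]
        exact treeStep_eq M (K - sPref A p) B j hj (by omega) hM
      · rw [if_neg hM]
        have : (M - j).toNat = 0 := by omega
        rw [hj'def, this]
        rfl
    rw [hquery]
    rw [show p - 1 + 1 + (j' - 1 + 1) = p + j' from by ring]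
    rw [show (if best < p + j' then p + j' else best) = max best (p + j') from by
      split <;> omega]
    have := ih (p - 1) j' (max best (p + j')) (by omega) hj'0.1 hj'0.2 (by omega) (by omega)
    rw [show sPref A (p - 1 + 1) = sPref A p from by rw [show p - 1 + 1 = p from by omega]] at this
    exact this

theorem solve_eq_alt (N M K : Int) (A B : List Int) : solve N M K A B = solve_alt N M K A B := by
  simp only [solve, solve_alt]
  -- phase 1: the greedy A-prefix
  have h1 := loop1_eq N K A N.toNat 0 le_rfl
  rw [show sPref A (0:Int) = 0 from by simp [sPref]] at h1
  norm_num at h1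
  set i0 := i0Loop N K (mkPref A N) N.toNat 0 with hi0
  have hib := i0Loop_bounds N K (mkPref A N) N.toNat 0
  rw [h1]
  -- phase 2: the initial B-extension
  have h2 := loop2_lin M K B M.toNat (-1) (sPref A i0) (by norm_num)
  rw [show (-1 : Int) + 1 = 0 from by norm_num,
      show sPref B (0:Int) = 0 from by simp [sPref], add_zero] at h2
  rw [h2]
  set j0 := linScan M (K - sPref A i0) B M.toNat 0 with hj0def
  have hj0 : 0 ≤ j0 ∧ (j0 ≤ M ∨ M ≤ 0) := by
    by_cases hM : 0 < M
    · have := linScan_bounds M (K - sPref A i0) B M.toNat 0 (by omega)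
      exact ⟨by omega, Or.inl this.2⟩
    · have hz : M.toNat = 0 := by omega
      rw [hj0def, hz]
      simp only [linScan]
      exact ⟨le_rfl, Or.inr (by omega)⟩
  -- the recorded initial best
  rw [show max 0 (i0 - 1 + 1 + (j0 - 1 + 1)) = max 0 (i0 + j0) from by omega]
  -- A's outer loop ↔ B's outer loop
  have hout := outer_eq N M K A B (i0 - 1 + 1).toNat (i0 - 1) j0 (max 0 (i0 + j0))
    rfl hj0.1 hj0.2 (by omega) (by omega)
  rw [show sPref A (i0 - 1 + 1) = sPref A i0 from by
    rw [show i0 - 1 + 1 = i0 from by omega]] at hout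
  rw [hout]
  -- unfold the first iteration of B's outer loop
  have hgetA : PySem.List.pyGetD (mkPref A N) i0 0 = sPref A i0 :=
    mkPref_get A N i0 (by omega) (by omega)
  have hquery :
      (match (if 0 < M then some (buildT (mkPref B M) M.toNat 1 (M + 1)) else none) with
        | none => (0 : Int)
        | some tr =>
          match queryT (K - sPref A i0) tr 1 (M + 1) (0 + 1) with
          | none => M
          | some idx => idx - 1) = j0 := by
    by_cases hM : 0 < M
    · rw [if_pos hM]
      have := treeStep_eq M (K - sPref A i0) B 0 le_rfl (by omega) hM
      rw [show (M - 0).toNat = M.toNat from by norm_num] at this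
      simpa using this
    · rw [if_neg hM]
      show (0 : Int) = j0
      rw [hj0def, show M.toNat = 0 from by omega]
      rfl
  have hstep : outLoop M K (mkPref A N)
        (if 0 < M then some (buildT (mkPref B M) M.toNat 1 (M + 1)) else none)
        (i0.toNat + 1) i0 0 0
      = outLoop M K (mkPref A N)
        (if 0 < M then some (buildT (mkPref B M) M.toNat 1 (M + 1)) else none)
        i0.toNat (i0 - 1) j0 (max 0 (i0 + j0)) := by
    simp only [outLoop]
    rw [hgetA, hquery]
    rw [show (if 0 < i0 + j0 then i0 + j0 else (0:Int)) = max 0 (i0 + j0) from by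
      split <;> omega]
  rw [show (i0 + 1).toNat = i0.toNat + 1 from by omega, hstep,
      show (i0 - 1 + 1).toNat = i0.toNat from by omega]


-- ===== VERDICT (by name: the statement is the Claim_ definition above) =====
theorem solve_spec : Claim_equal_solve := by
  intro N M K A B _hdom _hpre
  exact solve_eq_alt N M K A B
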